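-- pv_equiv track=rewrite | github.com/livegoplayer/scripts | num/bun.py | generate_lists
-- ===== SOURCE A (Python) =====
-- def generate_lists(input_list, positions, start, end, step):
--     generated_lists = []
--     positions.sort()  # 确保位置按照从小到大的顺序排列
--     num_positions = len(positions)
--     current_values = [start] * num_positions  # 记录当前位置的值
--     while True:
--         # 生成新的列表
--         new_list = input_list.copy()
--         for i in range(num_positions):
--             new_list[positions[i]] = current_values[i]
--         generated_lists.append(new_list)
--
--         # 更新当前位置的值
--         j = num_positions - 1
--         while j >= 0:
--             current_values[j] += step
--             if current_values[j] <= end: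
--                 break
--             current_values[j] = start
--             j -= 1
--         if j < 0:
--             break  # 所有位置的值都已达到最大值，结束循环
--
--     return generated_lists
-- ===== SOURCE B (Python) =====
-- def generate_lists(input_list, positions, start, end, step):
--     # Mutates `positions` in place (sorts it), like the original.
--     positions.sort()
--     result = []
--
--     def rec(chosen):
--         if len(chosen) == len(positions):
--             out = input_list.copy()
--             for p, val in zip(positions, chosen):
--                 out[p] = val
--             result.append(out)
--             return
--         v = start
--         while True:  # do-while: the value `start` is always tried once
--             rec(chosen + [v])
--             v += step
--             if v > end:
--                 break
--
--     rec([])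
--     return result
-- ===== Notes on version B (the rewrite author's own statement) =====
-- stated objective: alternative
-- what changed: A's in-place odometer (mutating current_values right-to-left with reset/carry inside an unbounded while-loop) is replaced by a recursive depth-first enumerator that regenerates the value sequence with a do-while at every depth and assigns the finished tuple at each leaf.
import Mathlib
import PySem

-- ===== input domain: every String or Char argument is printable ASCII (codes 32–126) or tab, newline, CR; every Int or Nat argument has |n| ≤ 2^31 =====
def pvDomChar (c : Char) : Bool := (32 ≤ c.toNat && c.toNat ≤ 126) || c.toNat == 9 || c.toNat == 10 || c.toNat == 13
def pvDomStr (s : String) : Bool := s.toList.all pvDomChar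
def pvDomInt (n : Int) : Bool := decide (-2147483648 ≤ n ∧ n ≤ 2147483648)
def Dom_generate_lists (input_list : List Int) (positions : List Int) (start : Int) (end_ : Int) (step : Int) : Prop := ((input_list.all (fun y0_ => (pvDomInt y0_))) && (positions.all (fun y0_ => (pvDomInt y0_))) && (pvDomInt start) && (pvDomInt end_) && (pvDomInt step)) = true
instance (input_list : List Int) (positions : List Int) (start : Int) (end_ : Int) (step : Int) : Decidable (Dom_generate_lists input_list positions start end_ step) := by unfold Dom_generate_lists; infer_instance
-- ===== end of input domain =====

-- B replaces A's odometer (mutating current_values in place) by a recursive depth-first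
-- enumerator that regenerates the values with a do-while at every depth (objective:
-- alternative decomposition). Both A and B sort `positions` in place; the equivalence is
-- about the return value.

-- ===== PORT A =====
-- for i in range(n): new_list[positions[i]] = current_values[i]
def pvAssignA (input_list sortedPos cv : List Int) : List Int :=
  (List.range sortedPos.length).foldl
    (fun acc (i : Nat) => PySem.List.pySetD acc (PySem.List.pyGetD sortedPos (i : Int) 0)
                    (PySem.List.pyGetD cv (i : Int) 0)) input_list

-- the inner `while j >= 0` loop (runs from the right end of current_values; recursion
-- processes the tail first); `none` = the loop fell off the left end (j < 0)
def pvIncrA (start end_ step : Int) : List Int → Option (List Int)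
  | [] => none
  | x :: rest =>
    match pvIncrA start end_ step rest with
    | some r => some (x :: r)
    | none => if x + step ≤ end_ then some ((x + step) :: List.replicate rest.length start) else none

-- the outer `while True` loop; the Nat argument is a totality guard only (never exhausted
-- under Pre_, proved below)
def pvLoopA (input_list sortedPos : List Int) (start end_ step : Int) : Nat → List Int → List (List Int)
  | 0, _ => []
  | f+1, cv =>
    pvAssignA input_list sortedPos cv ::
      (match pvIncrA start end_ step cv with
       | none => []
       | some cv' => pvLoopA input_list sortedPos start end_ step f cv')

def generate_lists (input_list : List Int) (positions : List Int) (start : Int) (end_ : Int) (step : Int) : List (List Int) :=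
  let sortedPos := PySem.List.sorted positions (fun x => x) false
  pvLoopA input_list sortedPos start end_ step
    (((end_ - start).toNat + 1) ^ sortedPos.length)
    (List.replicate sortedPos.length start)

-- ===== PORT B =====
-- for p, val in zip(positions, chosen): out[p] = val
def pvAssignB (input_list sortedPos chosen : List Int) : List Int :=
  (sortedPos.zip chosen).foldl (fun out pv => PySem.List.pySetD out pv.1 pv.2) input_list

-- the do-while over v at one recursion level; `recf` is the recursive call at the next
-- depth; the Nat fuel is a totality guard only (sufficient under Pre_)
def pvLevelB (end_ step : Int) (recf : List Int → List (List Int)) : Nat → Int → List Int → List (List Int)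
  | 0, v, chosen => recf (chosen ++ [v])
  | f+1, v, chosen =>
    recf (chosen ++ [v]) ++ (if v + step > end_ then [] else pvLevelB end_ step recf f (v + step) chosen)

-- rec(chosen): at the leaf emit the assigned copy, else run the do-while over v
def pvRecB (input_list sortedPos : List Int) (start end_ step : Int) : Nat → List Int → List (List Int)
  | 0, chosen => [pvAssignB input_list sortedPos chosen]
  | n+1, chosen =>
    pvLevelB end_ step (pvRecB input_list sortedPos start end_ step n)
      ((end_ - start).toNat + 1) start chosen

def generate_lists_alt (input_list : List Int) (positions : List Int) (start : Int) (end_ : Int) (step : Int) : List (List Int) :=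
  let sortedPos := PySem.List.sorted positions (fun x => x) false
  pvRecB input_list sortedPos start end_ step sortedPos.length []

-- ===== PRECONDITION & SPEC =====
-- Pre_ excludes only: positions out of range of input_list (A raises IndexError, B too)
-- and nonempty positions with a non-positive step reaching end (both A and B loop forever).
def Pre_generate_lists (input_list : List Int) (positions : List Int) (start : Int) (end_ : Int) (step : Int) : Prop :=
  (positions = [] ∨ 1 ≤ step ∨ end_ < start + step) ∧ ∀ p ∈ positions, PySem.Raise.InRange input_list.length p
instance (input_list : List Int) (positions : List Int) (start : Int) (end_ : Int) (step : Int) : Decidable (Pre_generate_lists input_list positions start end_ step) := by unfold Pre_generate_lists; infer_instance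

def pvWitness_generate_lists : List Int × List Int × Int × Int × Int := ([1, 2, 3], [0, 2], 0, 1, 1)

def Spec_generate_lists (input_list : List Int) (positions : List Int) (start : Int) (end_ : Int) (step : Int) (out : List (List Int)) : Prop := out = generate_lists_alt input_list positions start end_ step
instance (input_list : List Int) (positions : List Int) (start : Int) (end_ : Int) (step : Int) (out : List (List Int)) : Decidable (Spec_generate_lists input_list positions start end_ step out) := by unfold Spec_generate_lists; infer_instance

-- ===== CLAIM (what is proved, stated in full; the proofs are below) =====
def Claim_equal_generate_lists : Prop := ∀ (input_list : List Int) (positions : List Int) (start : Int) (end_ : Int) (step : Int), Dom_generate_lists input_list positions start end_ step → Pre_generate_lists input_list positions start end_ step → Spec_generate_lists input_list positions start end_ step (generate_lists input_list positions start end_ step)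

-- ===== LEMMAS AND PROOFS =====

-- the value list one do-while level runs through, with fuel f
def pvValsB (end_ step : Int) : Nat → Int → List Int
  | 0, v => [v]
  | f+1, v => v :: (if v + step > end_ then [] else pvValsB end_ step f (v + step))

-- the ideal per-position value list (self-normalising fuel)
def pvV (end_ step v : Int) : List Int := pvValsB end_ step ((end_ - v).toNat + 1) v

-- the cartesian product vals^n, first coordinate outermost
def pvProd (vals : List Int) : Nat → List (List Int)
  | 0 => [[]]
  | n+1 => vals.flatMap (fun v => (pvProd vals n).map (v :: ·))

-- the tuples A's odometer will still emit, starting from state cv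
def pvTup (start end_ step : Int) : List Int → List (List Int)
  | [] => [[]]
  | v :: rest =>
    (pvTup start end_ step rest).map (v :: ·) ++
      (if v + step ≤ end_ then pvV end_ step (v + step) else []).flatMap
        (fun w => (pvProd (pvV end_ step start) rest.length).map (w :: ·))

theorem pvLevelB_eq_vals (end_ step : Int) (recf : List Int → List (List Int)) :
    ∀ (f : Nat) (v : Int) (chosen : List Int),
      pvLevelB end_ step recf f v chosen
        = (pvValsB end_ step f v).flatMap (fun w => recf (chosen ++ [w])) := by
  intro f
  induction f with
  | zero => intro v chosen; simp [pvLevelB, pvValsB]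
  | succ f ih =>
    intro v chosen
    simp only [pvLevelB, pvValsB, List.flatMap_cons]
    by_cases hgt : v + step > end_
    · simp [hgt]
    · simp [hgt, ih]

theorem pvValsB_irrel (end_ step : Int) (hs : 1 ≤ step) :
    ∀ (f f' : Nat) (v : Int), end_ - v < (f : Int) → end_ - v < (f' : Int) →
      pvValsB end_ step f v = pvValsB end_ step f' v := by
  intro f
  induction f with
  | zero =>
    intro f' v h h'
    match f' with
    | 0 => rfl
    | Nat.succ f'' =>
      have hgt : v + step > end_ := by omega
      simp [pvValsB, hgt]
  | succ f ih =>
    intro f' v h h'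
    match f' with
    | 0 =>
      have hgt : v + step > end_ := by omega
      simp [pvValsB, hgt]
    | Nat.succ f'' =>
      simp only [pvValsB]
      by_cases hgt : v + step > end_
      · simp [hgt]
      · rw [if_neg hgt, if_neg hgt]
        congr 1
        exact ih f'' (v + step) (by push_cast at h ⊢; omega) (by push_cast at h' ⊢; omega)

theorem pvV_unfold (end_ step v : Int) (hs : 1 ≤ step) :
    pvV end_ step v = v :: (if v + step ≤ end_ then pvV end_ step (v + step) else []) := by
  by_cases hle : v + step ≤ end_
  · rw [if_pos hle]
    show pvValsB end_ step ((end_ - v).toNat + 1) v = v :: pvV end_ step (v + step)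
    rw [show pvValsB end_ step ((end_ - v).toNat + 1) v
          = v :: (if v + step > end_ then []
                  else pvValsB end_ step ((end_ - v).toNat) (v + step)) from rfl]
    rw [if_neg (by omega)]
    congr 1
    exact pvValsB_irrel end_ step hs _ _ _ (by omega) (by push_cast; omega)
  · rw [if_neg hle]
    show pvValsB end_ step ((end_ - v).toNat + 1) v = [v]
    simp [pvValsB, show v + step > end_ from by omega]

theorem pvValsB_len (end_ step : Int) (hs : 1 ≤ step) :
    ∀ (f : Nat) (v : Int), (pvValsB end_ step f v).length ≤ (end_ - v).toNat + 1 := by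
  intro f
  induction f with
  | zero => intro v; simp [pvValsB]
  | succ f ih =>
    intro v
    simp only [pvValsB]
    split
    · simp
    · rename_i hle
      have := ih (v + step)
      simp only [List.length_cons]
      omega

theorem pvProd_length (vals : List Int) (n : Nat) :
    (pvProd vals n).length = vals.length ^ n := by
  induction n with
  | zero => simp [pvProd]
  | succ n ih =>
    simp only [pvProd, List.length_flatMap]
    simp [ih, Nat.pow_succ, Nat.mul_comm]

theorem pvTup_replicate (start end_ step : Int) (hs : 1 ≤ step) (n : Nat) :
    pvTup start end_ step (List.replicate n start) = pvProd (pvV end_ step start) n := by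
  induction n with
  | zero => rfl
  | succ n ih =>
    rw [List.replicate_succ]
    simp only [pvTup, List.length_replicate, ih]
    have h1 : pvProd (pvV end_ step start) (n + 1)
        = (pvV end_ step start).flatMap
            (fun w => (pvProd (pvV end_ step start) n).map (w :: ·)) := rfl
    have h2 : (pvV end_ step start).flatMap
          (fun w => (pvProd (pvV end_ step start) n).map (w :: ·))
        = ((start :: if start + step ≤ end_ then pvV end_ step (start + step) else []).flatMap
          (fun w => (pvProd (pvV end_ step start) n).map (w :: ·))) := by
      conv_rhs => rw [← pvV_unfold end_ step start hs]
    rw [h1, h2, List.flatMap_cons]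

theorem pvIncrA_length (start end_ step : Int) :
    ∀ cv cv', pvIncrA start end_ step cv = some cv' → cv'.length = cv.length := by
  intro cv
  induction cv with
  | nil => intro cv' h; simp [pvIncrA] at h
  | cons x rest ih =>
    intro cv' h
    simp only [pvIncrA] at h
    cases hr : pvIncrA start end_ step rest with
    | some r =>
      rw [hr] at h
      injection h with h
      subst h
      simp [ih r hr]
    | none =>
      rw [hr] at h
      by_cases hle : x + step ≤ end_
      · rw [if_pos hle] at h
        injection h with h
        subst h
        simp
      · rw [if_neg hle] at h
        exact absurd h (by simp)

theorem pvTup_none (start end_ step : Int) :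
    ∀ cv, pvIncrA start end_ step cv = none → pvTup start end_ step cv = [cv] := by
  intro cv
  induction cv with
  | nil => intro _; rfl
  | cons v rest ih =>
    intro h
    simp only [pvIncrA] at h
    cases hr : pvIncrA start end_ step rest with
    | some r => rw [hr] at h; exact absurd h (by simp)
    | none =>
      rw [hr] at h
      by_cases hle : v + step ≤ end_
      · rw [if_pos hle] at h; exact absurd h (by simp)
      · simp only [pvTup]
        rw [ih hr, if_neg hle]
        simp

theorem pvTup_some (start end_ step : Int) (hs : 1 ≤ step) :
    ∀ cv cv', pvIncrA start end_ step cv = some cv' →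
      pvTup start end_ step cv = cv :: pvTup start end_ step cv' := by
  intro cv
  induction cv with
  | nil => intro cv' h; simp [pvIncrA] at h
  | cons v rest ih =>
    intro cv' h
    simp only [pvIncrA] at h
    cases hr : pvIncrA start end_ step rest with
    | some r =>
      rw [hr] at h
      injection h with h
      subst h
      simp only [pvTup]
      rw [ih r hr, pvIncrA_length start end_ step rest r hr]
      simp [List.cons_append]
    | none =>
      rw [hr] at h
      by_cases hle : v + step ≤ end_
      · rw [if_pos hle] at h
        injection h with h
        subst h
        simp only [pvTup]
        rw [pvTup_none start end_ step rest hr, if_pos hle,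
            pvTup_replicate start end_ step hs rest.length, List.length_replicate]
        have h2 : (pvV end_ step (v + step)).flatMap
              (fun w => (pvProd (pvV end_ step start) rest.length).map (w :: ·))
            = (((v + step) :: if v + step + step ≤ end_ then pvV end_ step (v + step + step) else []).flatMap
              (fun w => (pvProd (pvV end_ step start) rest.length).map (w :: ·))) := by
          conv_rhs => rw [← pvV_unfold end_ step (v + step) hs]
        rw [h2, List.flatMap_cons]
        simp
      · rw [if_neg hle] at h
        exact absurd h (by simp)

theorem pvTup_pos (start end_ step : Int) :
    ∀ cv, 0 < (pvTup start end_ step cv).length := by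
  intro cv
  induction cv with
  | nil => simp [pvTup]
  | cons v rest ih =>
    simp only [pvTup, List.length_append, List.length_map]
    omega

theorem pvLoopA_eq (input_list sortedPos : List Int) (start end_ step : Int) (hs : 1 ≤ step) :
    ∀ (f : Nat) (cv : List Int), (pvTup start end_ step cv).length ≤ f →
      pvLoopA input_list sortedPos start end_ step f cv
        = (pvTup start end_ step cv).map (pvAssignA input_list sortedPos) := by
  intro f
  induction f with
  | zero =>
    intro cv h
    exact absurd h (by have := pvTup_pos start end_ step cv; omega)
  | succ f ih =>
    intro cv h
    simp only [pvLoopA]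
    cases hr : pvIncrA start end_ step cv with
    | none => rw [pvTup_none start end_ step cv hr]; simp
    | some cv' =>
      have hcons := pvTup_some start end_ step hs cv cv' hr
      have hlen : (pvTup start end_ step cv').length ≤ f := by
        rw [hcons] at h; simp at h; omega
      have hred : (match some cv' with
          | none => ([] : List (List Int))
          | some cv'' => pvLoopA input_list sortedPos start end_ step f cv'')
          = pvLoopA input_list sortedPos start end_ step f cv' := rfl
      rw [hred, hcons, ih cv' hlen]
      simp

theorem pvRecB_eq (input_list sortedPos : List Int) (start end_ step : Int) :
    ∀ (n : Nat) (chosen : List Int),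
      pvRecB input_list sortedPos start end_ step n chosen
        = (pvProd (pvValsB end_ step ((end_ - start).toNat + 1) start) n).map
            (fun t => pvAssignB input_list sortedPos (chosen ++ t)) := by
  intro n
  induction n with
  | zero => intro chosen; simp [pvRecB, pvProd]
  | succ n ih =>
    intro chosen
    simp only [pvRecB, pvProd, pvLevelB_eq_vals]
    simp [ih, List.map_flatMap, List.map_map, Function.comp_def, List.append_assoc]

theorem pvProd_mem_length (vals : List Int) :
    ∀ (k : Nat) (t : List Int), t ∈ pvProd vals k → t.length = k := by
  intro k
  induction k with
  | zero => intro t ht; simp [pvProd] at ht; simp [ht]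
  | succ k ih =>
    intro t ht
    simp only [pvProd, List.mem_flatMap, List.mem_map] at ht
    obtain ⟨v, -, t', ht', rfl⟩ := ht
    simp [ih t' ht']

theorem pvFoldl_range_zip (g : List Int → Int → Int → List Int) :
    ∀ (S cv : List Int) (il : List Int), S.length = cv.length →
      (List.range S.length).foldl (fun acc i => g acc (S.getD i 0) (cv.getD i 0)) il
        = (S.zip cv).foldl (fun acc pv => g acc pv.1 pv.2) il := by
  intro S
  induction S with
  | nil => intro cv il _; simp
  | cons p S' ih =>
    intro cv il hlen
    match cv with
    | [] => simp at hlen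
    | c :: cv' =>
      simp only [List.length_cons, List.range_succ_eq_map, List.foldl_cons, List.foldl_map,
        List.getD_cons_zero, List.getD_cons_succ, List.zip_cons_cons]
      exact ih cv' (g il p c) (by simpa using hlen)

theorem pvAssign_eq (il S cv : List Int) (hlen : cv.length = S.length) :
    pvAssignA il S cv = pvAssignB il S cv := by
  unfold pvAssignA pvAssignB
  rw [show (fun (acc : List Int) (i : Nat) => PySem.List.pySetD acc (PySem.List.pyGetD S (i : Int) 0)
        (PySem.List.pyGetD cv (i : Int) 0))
      = (fun acc i => PySem.List.pySetD acc (S.getD i 0) (cv.getD i 0)) from by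
    funext acc i; rw [PySem.List.pyGetD_natCast, PySem.List.pyGetD_natCast]]
  exact pvFoldl_range_zip (fun acc p v => PySem.List.pySetD acc p v) S cv il hlen.symm

theorem pvValsB_deg (end_ step v : Int) (h : end_ < v + step) :
    ∀ f, pvValsB end_ step f v = [v] := by
  intro f
  cases f with
  | zero => rfl
  | succ f => simp [pvValsB, show v + step > end_ from h]

theorem pvRecB_deg (il S : List Int) (start end_ step : Int) (h : end_ < start + step) :
    ∀ (n : Nat) (chosen : List Int),
      pvRecB il S start end_ step n chosen
        = [pvAssignB il S (chosen ++ List.replicate n start)] := by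
  intro n
  induction n with
  | zero => intro chosen; simp [pvRecB]
  | succ n ih =>
    intro chosen
    simp only [pvRecB, pvLevelB_eq_vals, pvValsB_deg end_ step start h,
      List.flatMap_cons, List.flatMap_nil, List.append_nil, ih, List.replicate_succ]
    simp [List.append_assoc]

theorem pvIncrA_deg (start end_ step : Int) (h : end_ < start + step) :
    ∀ n, pvIncrA start end_ step (List.replicate n start) = none := by
  intro n
  induction n with
  | zero => rfl
  | succ n ih =>
    simp [List.replicate_succ, pvIncrA, ih, show ¬(start + step ≤ end_) from by omega]

-- ===== VERDICT (by name: the statement is the Claim_ definition above) =====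
theorem generate_lists_spec : Claim_equal_generate_lists := by
  intro input_list positions start end_ step _hDom hPre
  obtain ⟨hstep, -⟩ := hPre
  unfold Spec_generate_lists generate_lists generate_lists_alt
  set S := PySem.List.sorted positions (fun x => x) false with hS
  rcases hstep with hnil | hs | hlt
  case _ =>
    -- positions = []: both return one unmodified copy of input_list
    have hSnil : S = [] := by rw [hS, hnil]; rfl
    show pvLoopA input_list S start end_ step (((end_ - start).toNat + 1) ^ S.length)
          (List.replicate S.length start)
        = pvRecB input_list S start end_ step S.length []
    rw [hSnil]
    simp [pvLoopA, pvIncrA, pvRecB, pvAssignA, pvAssignB]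
  case _ =>
    have hVlen : (pvV end_ step start).length ≤ (end_ - start).toNat + 1 :=
      pvValsB_len end_ step hs _ start
    have hfuel : (pvTup start end_ step (List.replicate S.length start)).length
        ≤ ((end_ - start).toNat + 1) ^ S.length := by
      rw [pvTup_replicate start end_ step hs, pvProd_length]
      exact Nat.pow_le_pow_left hVlen _
    rw [pvLoopA_eq input_list S start end_ step hs _ _ hfuel,
        pvTup_replicate start end_ step hs,
        pvRecB_eq]
    apply List.map_congr_left
    intro t ht
    rw [List.nil_append]
    exact pvAssign_eq input_list S t
      (pvProd_mem_length _ S.length t ht)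
  case _ =>
    show pvLoopA input_list S start end_ step (((end_ - start).toNat + 1) ^ S.length)
          (List.replicate S.length start)
        = pvRecB input_list S start end_ step S.length []
    obtain ⟨f, hf⟩ : ∃ f, ((end_ - start).toNat + 1) ^ S.length = f + 1 := by
      have : 0 < ((end_ - start).toNat + 1) ^ S.length := Nat.pow_pos (by omega)
      exact ⟨((end_ - start).toNat + 1) ^ S.length - 1, by omega⟩
    rw [hf]
    simp only [pvLoopA, pvIncrA_deg start end_ step hlt S.length]
    rw [pvRecB_deg input_list S start end_ step hlt, List.nil_append,
        pvAssign_eq input_list S (List.replicate S.length start) (by simp)]
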